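-- pv_equiv track=rewrite | github.com/sarahhannahwu/benchmarking-creativity | analysis/functions/tools.py | encode_shape_binaries
-- ===== SOURCE A (Python) =====
-- def encode_shape_binaries(shape, bits=10):
--     """
--     Encodes a 2D list (shape) of 0/1 bits into a single string of
--     space-separated decimal codes. Each row in the shape becomes one code.
--
--     :param shape: A list of lists, where each sub-list is a row of bits (0's and 1's).
--     :param bits: The fixed width of the binary representation (default=10).
--     :return: A single string with space-separated decimal values
--              (e.g., "1016 64 64 64").
--     """
--     codes = []
--     for row in shape:
--         if 1 not in row:
--             continue
--         # Convert the list of bits into a binary string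
--         binary_str = ''.join([str(bit) for bit in row])
--
--         # Convert the binary string into an integer
--         number = int(binary_str, 2)
--
--         codes.append(str(number))
--
--     return ' '.join(codes)
-- ===== SOURCE B (Python) =====
-- def encode_shape_binaries(shape, bits=10):
--     """Same encoding, but each row's code is accumulated arithmetically
--     (Horner's method) instead of building a binary string and parsing it."""
--     codes = []
--     for row in shape:
--         if 1 not in row:
--             continue
--         number = 0
--         for bit in row:
--             number = number * 2 + bit
--         codes.append(str(number))
--     return ' '.join(codes)
-- ===== Notes on version B (the rewrite author's own statement) =====
-- stated objective: simpler
-- what changed: Each kept row's code is accumulated directly with Horner's method (number = number*2 + bit) instead of joining the bits into a binary string and parsing it with int(s, 2).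
-- outside the precondition, e.g. on encode_shape_binaries([[1, 10]], 10): A returns '6', B returns '12'; on encode_shape_binaries([[1, 2]], 10): A raises ValueError, B returns '4'
import Mathlib
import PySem

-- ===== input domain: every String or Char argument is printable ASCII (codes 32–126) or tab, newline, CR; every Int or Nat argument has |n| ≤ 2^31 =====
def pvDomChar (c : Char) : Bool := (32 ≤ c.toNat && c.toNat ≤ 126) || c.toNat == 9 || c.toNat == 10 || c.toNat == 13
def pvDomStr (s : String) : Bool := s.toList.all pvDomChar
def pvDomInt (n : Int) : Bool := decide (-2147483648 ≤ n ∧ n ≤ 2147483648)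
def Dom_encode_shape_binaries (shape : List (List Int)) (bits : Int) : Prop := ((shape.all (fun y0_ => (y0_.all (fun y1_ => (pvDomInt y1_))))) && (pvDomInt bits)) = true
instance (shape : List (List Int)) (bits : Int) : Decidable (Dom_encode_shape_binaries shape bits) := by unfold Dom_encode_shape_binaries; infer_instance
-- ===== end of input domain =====

-- B replaces A's per-row "join bits into a binary string, then int(s, 2)" with a direct
-- arithmetic Horner accumulation (number = number*2 + bit); same skip rule and joining.


-- ===== PORT A =====
-- Hand port of Python's int(s, 2) restricted to what Pre_ admits: a nonempty string of
-- '0'/'1' digits (the join of str(bit) with bit ∈ {0,1}).  It is exact there; the general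
-- int(_, 2) extras (whitespace, sign, '0b' prefix, underscores) cannot occur in such strings.
-- none = ValueError.
def pvParseBinDigits? : List Char → Int → Option Int
  | [], acc => some acc
  | c :: r, acc =>
    if c = '0' then pvParseBinDigits? r (acc * 2)
    else if c = '1' then pvParseBinDigits? r (acc * 2 + 1)
    else none

def pvIntBase2? (s : String) : Option Int :=
  match s.toList with
  | [] => none
  | c :: cs => pvParseBinDigits? (c :: cs) 0

def encode_shape_binaries (shape : List (List Int)) (bits : Int) : String :=
  let codes := shape.foldl (fun codes row =>
    if (1 : Int) ∈ row then
      let binary_str := PySem.Str.join "" (row.map (fun bit => PySem.Int.toStr bit))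
      -- int(binary_str, 2); the ValueError case (none) is excluded by Pre_
      let number := (pvIntBase2? binary_str).getD 0
      codes ++ [PySem.Int.toStr number]
    else codes) []
  PySem.Str.join " " codes

-- ===== PORT B =====
def encode_shape_binaries_alt (shape : List (List Int)) (bits : Int) : String :=
  let codes := shape.foldl (fun codes row =>
    if (1 : Int) ∈ row then
      codes ++ [PySem.Int.toStr (row.foldl (fun number bit => number * 2 + bit) 0)]
    else codes) []
  PySem.Str.join " " codes

-- ===== PRECONDITION & SPEC =====
-- Pre_ restricts to the function's natural domain of genuine bit rows: every row containing a 1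
-- has only 0/1 entries.  Outside it A either raises ValueError (e.g. an entry 2 or -1 in a kept
-- row) or, when every entry's decimal digits happen to be 0/1 (e.g. [[1, 10]]), accidentally
-- reinterprets the concatenated decimal digits as one binary number.
def Pre_encode_shape_binaries (shape : List (List Int)) (bits : Int) : Prop :=
  ∀ row ∈ shape, (1 : Int) ∈ row → ∀ b ∈ row, b = 0 ∨ b = 1
instance (shape : List (List Int)) (bits : Int) : Decidable (Pre_encode_shape_binaries shape bits) := by unfold Pre_encode_shape_binaries; infer_instance

def pvWitness_encode_shape_binaries : List (List Int) × Int :=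
  ([[1, 1, 1, 1, 1, 1, 1, 1, 0, 0], [0, 1, 0, 0, 0, 0, 0, 0, 0, 0]], 10)

def Spec_encode_shape_binaries (shape : List (List Int)) (bits : Int) (out : String) : Prop := out = encode_shape_binaries_alt shape bits
instance (shape : List (List Int)) (bits : Int) (out : String) : Decidable (Spec_encode_shape_binaries shape bits out) := by unfold Spec_encode_shape_binaries; infer_instance

-- ===== CLAIM (what is proved, stated in full; the proofs are below) =====
def Claim_equal_encode_shape_binaries : Prop := ∀ (shape : List (List Int)) (bits : Int), Dom_encode_shape_binaries shape bits → Pre_encode_shape_binaries shape bits → Spec_encode_shape_binaries shape bits (encode_shape_binaries shape bits)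

-- ===== LEMMAS AND PROOFS =====
theorem pv_toChars_bit (b : Int) (h : b = 0 ∨ b = 1) :
    PySem.Int.toChars b = [if b = 1 then '1' else '0'] := by
  rcases h with h | h <;> subst h <;> decide

theorem pv_parse_horner (row : List Int) (acc : Int) (h : ∀ b ∈ row, b = 0 ∨ b = 1) :
    pvParseBinDigits? (row.map (fun b => if b = 1 then '1' else '0')) acc
      = some (row.foldl (fun n b => n * 2 + b) acc) := by
  induction row generalizing acc with
  | nil => simp [pvParseBinDigits?]
  | cons b r ih =>
    have hb := h b (by simp)
    have hr : ∀ x ∈ r, x = 0 ∨ x = 1 := fun x hx => h x (by simp [hx])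
    rcases hb with hb | hb <;> subst hb <;>
      simp [pvParseBinDigits?, ih _ hr]

theorem pv_join_bits (row : List Int) (h : ∀ b ∈ row, b = 0 ∨ b = 1) :
    (PySem.Str.join "" (row.map (fun bit => PySem.Int.toStr bit))).toList
      = row.map (fun b => if b = 1 then '1' else '0') := by
  rw [PySem.Str.toList_join]
  have : (row.map (fun bit => PySem.Int.toStr bit)).map String.toList
      = ((row.map (fun b => if b = 1 then '1' else '0')).map (fun c => [c])) := by
    simp only [List.map_map]
    exact List.map_congr_left (fun b hb => by
      simp [PySem.Int.toList_toStr, pv_toChars_bit b (h b hb)])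
  rw [this]
  exact PySem.Chars.join_nil_singletons _

theorem pv_row_code (row : List Int) (h1 : (1 : Int) ∈ row) (h : ∀ b ∈ row, b = 0 ∨ b = 1) :
    (pvIntBase2? (PySem.Str.join "" (row.map (fun bit => PySem.Int.toStr bit)))).getD 0
      = row.foldl (fun number bit => number * 2 + bit) 0 := by
  have hne : row ≠ [] := by rintro rfl; simp at h1
  unfold pvIntBase2?
  rw [pv_join_bits row h]
  cases row with
  | nil => exact absurd rfl hne
  | cons b r =>
    have hp := pv_parse_horner (b :: r) 0 h
    simp only [List.map_cons] at hp ⊢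
    rw [hp]
    rfl

-- ===== VERDICT (by name: the statement is the Claim_ definition above) =====
theorem encode_shape_binaries_spec : Claim_equal_encode_shape_binaries := by
  intro shape bits _ hpre
  unfold Spec_encode_shape_binaries encode_shape_binaries encode_shape_binaries_alt
  refine congrArg (PySem.Str.join " ") (PySem.List.foldl_congr_mem _ _ _ _ ?_)
  intro acc row hrow
  by_cases h1 : (1 : Int) ∈ row
  · simp only [h1, if_pos]
    rw [pv_row_code row h1 (hpre row hrow h1)]
  · simp [h1]
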